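-- pv_equiv track=rewrite | github.com/FanchenBao/leetcode | Contest_147/1139.py | find_next_stretch
-- ===== SOURCE A (Python) =====
-- from typing import List, Tuple
--
-- def find_next_stretch(row: List[int], s: int) -> Tuple[int, int]:
--     """ given a starting position s, find the next stretch of 1s in row.
--         Return the next stretch's start and end values (inclusive)
--     """
--     first_one_encountered = False
--     stretch_start, stretch_end = -1, -1
--     for i in range(s, len(row)):
--         if row[i] == 1:
--             if not first_one_encountered:
--                 stretch_start = i
--                 first_one_encountered = True
--             stretch_end = i
--         elif first_one_encountered:
--             return stretch_start, stretch_end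
--     return stretch_start, stretch_end
-- ===== SOURCE B (Python) =====
-- from typing import List, Tuple
--
-- def find_next_stretch(row: List[int], s: int) -> Tuple[int, int]:
--     """Backward merge fold: scan indices right-to-left, maintaining the first
--     stretch of 1s of the suffix; a 1 at i either merges with a stretch
--     starting at i+1 or opens a new singleton stretch (i, i)."""
--     best = None
--     for i in reversed(range(s, len(row))):
--         if row[i] == 1:
--             if best is not None and best[0] == i + 1:
--                 best = (i, best[1])
--             else:
--                 best = (i, i)
--     return best if best is not None else (-1, -1)
-- ===== Notes on version B (the rewrite author's own statement) =====
-- stated objective: alternative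
-- what changed: A's forward flag-driven scan with early return is replaced by a backward right-to-left fold that maintains the first stretch of the suffix, merging a 1 at i with a stretch starting at i+1 or opening a singleton; no flag and no early exit.
import Mathlib
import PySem

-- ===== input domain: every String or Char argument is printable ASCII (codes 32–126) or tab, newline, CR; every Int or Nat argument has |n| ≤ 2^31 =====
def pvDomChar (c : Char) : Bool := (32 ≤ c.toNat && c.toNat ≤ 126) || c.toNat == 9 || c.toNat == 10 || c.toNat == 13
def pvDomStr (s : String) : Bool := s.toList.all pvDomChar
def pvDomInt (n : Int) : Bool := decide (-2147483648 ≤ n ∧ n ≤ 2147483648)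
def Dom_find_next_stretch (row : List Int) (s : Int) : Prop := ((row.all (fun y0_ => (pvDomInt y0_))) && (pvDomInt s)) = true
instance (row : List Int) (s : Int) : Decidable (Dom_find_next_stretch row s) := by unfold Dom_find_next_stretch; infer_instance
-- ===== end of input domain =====

-- B replaces A's forward flag-driven scan by a backward merge fold over the same index range; same O(n) cost, return value only.


-- ===== PORT A =====
-- A's loop over range(s, len(row)) with state (first_one_encountered, stretch_start, stretch_end);
-- row[i] is ported as pyGetD row i 0 (exact under Pre_, which rules out IndexError).
def fnsGoA (row : List Int) : List Int → Bool → Int → Int → Int × Int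
  | [], _, st, en => (st, en)
  | i :: rest, f, st, en =>
    if PySem.List.pyGetD row i 0 = 1 then
      fnsGoA row rest true (if f then st else i) i
    else if f then (st, en) else fnsGoA row rest f st en

def find_next_stretch (row : List Int) (s : Int) : Int × Int :=
  fnsGoA row (PySem.List.pyRange s (row.length : Int) 1) false (-1) (-1)

-- ===== PORT B =====
-- B's loop 'for i in reversed(range(s, n))' updating best is a right fold over range(s, n):
-- at index i with row[i] == 1, merge with a stretch starting at i+1 or open (i, i).
def fnsGoB (row : List Int) : List Int → Option (Int × Int)
  | [] => none
  | i :: rest =>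
    let best := fnsGoB row rest
    if PySem.List.pyGetD row i 0 = 1 then
      some (match best with
            | some (st, en) => if st = i + 1 then (i, en) else (i, i)
            | none => (i, i))
    else best

def find_next_stretch_alt (row : List Int) (s : Int) : Int × Int :=
  match fnsGoB row (PySem.List.pyRange s (row.length : Int) 1) with
  | none => (-1, -1)
  | some p => p

-- ===== PRECONDITION & SPEC =====
-- Pre_ excludes exactly the inputs where both Pythons raise IndexError: s < -len(row)
-- makes the access row[s] (reached by both loops) out of range.
def Pre_find_next_stretch (row : List Int) (s : Int) : Prop := -(row.length : Int) ≤ s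
instance (row : List Int) (s : Int) : Decidable (Pre_find_next_stretch row s) := by unfold Pre_find_next_stretch; infer_instance

def pvWitness_find_next_stretch : List Int × Int := ([0, 1, 1, 0, 1], 0)

def Spec_find_next_stretch (row : List Int) (s : Int) (out : Int × Int) : Prop := out = find_next_stretch_alt row s
instance (row : List Int) (s : Int) (out : Int × Int) : Decidable (Spec_find_next_stretch row s out) := by unfold Spec_find_next_stretch; infer_instance

-- ===== CLAIM =====
def Claim_equal_find_next_stretch : Prop := ∀ (row : List Int) (s : Int), Dom_find_next_stretch row s → Pre_find_next_stretch row s → Spec_find_next_stretch row s (find_next_stretch row s)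

-- ===== LEMMAS AND PROOFS =====

-- A stretch returned by B's fold over range(t, n) starts at or after t.
theorem fnsGoB_start_ge (row : List Int) : ∀ (k : Nat) (t st en : Int),
    (((row.length : Int) - t)).toNat ≤ k →
    fnsGoB row (PySem.List.pyRange t (row.length : Int) 1) = some (st, en) → t ≤ st := by
  intro k
  induction k with
  | zero =>
    intro t st en hk h
    have hge : (row.length : Int) ≤ t := by omega
    rw [PySem.List.pyRange_one_eq_nil hge] at h
    simp [fnsGoB] at h
  | succ k ih =>
    intro t st en hk h
    by_cases hlt : t < (row.length : Int)
    · rw [PySem.List.pyRange_one_cons hlt] at h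
      simp only [fnsGoB] at h
      by_cases h1 : PySem.List.pyGetD row t 0 = 1
      · simp only [h1, if_true, Option.some.injEq] at h
        rcases hb : fnsGoB row (PySem.List.pyRange (t + 1) (row.length : Int) 1) with _ | ⟨st', en'⟩ <;>
          simp only [hb] at h
        · simp only [Prod.mk.injEq] at h; omega
        · split at h <;> (simp only [Prod.mk.injEq] at h; omega)
      · simp only [h1, if_false] at h
        have := ih (t + 1) st en (by omega) h
        omega
    · have hge : (row.length : Int) ≤ t := by omega
      rw [PySem.List.pyRange_one_eq_nil hge] at h
      simp [fnsGoB] at h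

-- A's run-extension once the flag is set: fnsGoA with flag true returns (st, extended end).
def fnsExtendSpec (row : List Int) : List Int → Int → Int
  | [], en => en
  | i :: rest, en =>
    if PySem.List.pyGetD row i 0 = 1 then fnsExtendSpec row rest i else en

theorem fnsGoA_true (row : List Int) : ∀ (idxs : List Int) (st en : Int),
    fnsGoA row idxs true st en = (st, fnsExtendSpec row idxs en) := by
  intro idxs
  induction idxs with
  | nil => intro st en; rfl
  | cons i rest ih =>
    intro st en
    simp only [fnsGoA, fnsExtendSpec]
    by_cases h : PySem.List.pyGetD row i 0 = 1
    · simp [h, ih]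
    · simp [h]

-- The merge step of B at a 1 at index s computes exactly A's extension of the run from s.
theorem fnsGoB_merge (row : List Int) : ∀ (k : Nat) (s : Int),
    (((row.length : Int) - (s + 1))).toNat ≤ k →
    (match fnsGoB row (PySem.List.pyRange (s + 1) (row.length : Int) 1) with
     | some (st, en) => if st = s + 1 then (s, en) else (s, s)
     | none => ((s : Int), (s : Int)))
      = (s, fnsExtendSpec row (PySem.List.pyRange (s + 1) (row.length : Int) 1) s) := by
  intro k
  induction k with
  | zero =>
    intro s hk
    have hge : (row.length : Int) ≤ s + 1 := by omega
    rw [PySem.List.pyRange_one_eq_nil hge]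
    simp [fnsGoB, fnsExtendSpec]
  | succ k ih =>
    intro s hk
    by_cases hlt : s + 1 < (row.length : Int)
    · rw [PySem.List.pyRange_one_cons hlt]
      simp only [fnsGoB, fnsExtendSpec]
      by_cases h1 : PySem.List.pyGetD row (s + 1) 0 = 1
      · simp only [h1, if_true]
        have := ih (s + 1) (by omega)
        rcases hb : fnsGoB row (PySem.List.pyRange (s + 1 + 1) (row.length : Int) 1) with _ | ⟨st', en'⟩ <;>
          simp only [hb] at this ⊢
        · simpa using congrArg Prod.snd this
        · split at this <;> rename_i hst
          · simp only [hst]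
            simpa using congrArg Prod.snd this
          · simp only [hst]
            simpa using congrArg Prod.snd this
      · simp only [h1, if_false]
        rcases hb : fnsGoB row (PySem.List.pyRange (s + 1 + 1) (row.length : Int) 1) with _ | ⟨st', en'⟩
        · rfl
        · have hge := fnsGoB_start_ge row (((row.length : Int) - (s + 1 + 1))).toNat (s + 1 + 1) st' en' le_rfl hb
          have : st' ≠ s + 1 := by omega
          simp [this]
    · have hge : (row.length : Int) ≤ s + 1 := by omega
      rw [PySem.List.pyRange_one_eq_nil hge]
      simp [fnsGoB, fnsExtendSpec]

-- Main agreement, by fuel induction on the remaining range length.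
theorem fns_key (row : List Int) : ∀ (k : Nat) (s : Int),
    (((row.length : Int) - s)).toNat ≤ k →
    fnsGoA row (PySem.List.pyRange s (row.length : Int) 1) false (-1) (-1)
      = find_next_stretch_alt row s := by
  intro k
  induction k with
  | zero =>
    intro s hs
    have hge : (row.length : Int) ≤ s := by omega
    rw [PySem.List.pyRange_one_eq_nil hge]
    simp [find_next_stretch_alt, PySem.List.pyRange_one_eq_nil hge, fnsGoB, fnsGoA]
  | succ k ih =>
    intro s hs
    by_cases hlt : s < (row.length : Int)
    · rw [PySem.List.pyRange_one_cons hlt]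
      simp only [find_next_stretch_alt, PySem.List.pyRange_one_cons hlt, fnsGoB, fnsGoA]
      by_cases h : PySem.List.pyGetD row s 0 = 1
      · simp only [h, if_true]
        rw [fnsGoA_true]
        simp only [Bool.false_eq_true, if_false]
        have := fnsGoB_merge row (((row.length : Int) - (s + 1))).toNat s le_rfl
        rcases hb : fnsGoB row (PySem.List.pyRange (s + 1) (row.length : Int) 1) with _ | ⟨st', en'⟩ <;>
          simp only [hb] at this ⊢ <;> exact this.symm
      · simp only [h, if_false]
        have := ih (s + 1) (by omega)
        simpa [find_next_stretch_alt] using this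
    · have hge : (row.length : Int) ≤ s := by omega
      rw [PySem.List.pyRange_one_eq_nil hge]
      simp [find_next_stretch_alt, PySem.List.pyRange_one_eq_nil hge, fnsGoB, fnsGoA]

-- ===== VERDICT =====
theorem find_next_stretch_spec : Claim_equal_find_next_stretch := by
  intro row s _ _
  unfold Spec_find_next_stretch find_next_stretch
  exact fns_key row (((row.length : Int) - s)).toNat s le_rfl
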